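-- pv_equiv track=rewrite | github.com/odottori/QOpz.AI | scripts/generate_briefing.py | _build_telegram_caption
-- ===== SOURCE A (Python) =====
-- def _build_telegram_caption(text: str) -> str:
--     """Versione testuale breve per il messaggio Telegram (max 4096 chars)."""
--     lines = [l for l in text.split("\n") if l.strip()]
--     # Prendi le prime righe fino a ~800 chars
--     out = []
--     total = 0
--     for l in lines:
--         if total + len(l) > 800:
--             out.append("...")
--             break
--         out.append(l)
--         total += len(l)
--     return "\n".join(out)
-- ===== SOURCE B (Python) =====
-- def _build_telegram_caption(text: str) -> str:
--     """Versione testuale breve per il messaggio Telegram (max 4096 chars)."""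
--     lines = [l for l in text.split("\n") if l.strip()]
--     # Prefix-sum table of line lengths, then cut at the largest prefix <= 800.
--     cum = []
--     t = 0
--     for l in lines:
--         t += len(l)
--         cum.append(t)
--     k = sum(1 for c in cum if c <= 800)
--     kept = lines[:k]
--     if k < len(lines):
--         kept = kept + ["..."]
--     return "\n".join(kept)
-- ===== Notes on version B (the rewrite author's own statement) =====
-- stated objective: alternative
-- what changed: Replaces the scan-with-break accumulator loop by a prefix-sum table of line lengths: the cutoff k is the count of cumulative sums at most 800 (valid since the table is nondecreasing), then the first k lines are sliced and an ellipsis line appended iff k < len(lines).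
import Mathlib
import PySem

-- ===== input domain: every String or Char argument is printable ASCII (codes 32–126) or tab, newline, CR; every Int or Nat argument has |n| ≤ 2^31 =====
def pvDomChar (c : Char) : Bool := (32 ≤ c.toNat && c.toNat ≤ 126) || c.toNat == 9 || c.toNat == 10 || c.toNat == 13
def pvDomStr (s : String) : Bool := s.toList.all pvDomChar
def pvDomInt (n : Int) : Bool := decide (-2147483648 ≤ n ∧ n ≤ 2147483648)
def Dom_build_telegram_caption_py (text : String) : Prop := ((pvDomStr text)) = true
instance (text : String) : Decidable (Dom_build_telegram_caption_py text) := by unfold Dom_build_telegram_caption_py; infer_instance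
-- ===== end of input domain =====

-- B replaces A's scan-with-break accumulator loop by a prefix-sum table of line
-- lengths plus a count of entries ≤ 800 (objective: alternative decomposition).

-- ===== PORT A =====
-- the for-loop with break: appends "..." and stops when the next line would exceed 800
def pvLoopA : List String → Int → List String
  | [], _ => []
  | l :: rest, total =>
    if total + PySem.Str.len l > 800 then ["..."]
    else l :: pvLoopA rest (total + PySem.Str.len l)

def build_telegram_caption_py (text : String) : String :=
  let lines := ((PySem.Str.split? text "\n").getD []).filter (fun l => PySem.Str.strip l != "")
  PySem.Str.join "\n" (pvLoopA lines 0)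

-- ===== PORT B =====
-- the prefix-sum table building loop of Source B
def pvCumB : List String → Int → List Int
  | [], _ => []
  | l :: rest, t => (t + PySem.Str.len l) :: pvCumB rest (t + PySem.Str.len l)

def build_telegram_caption_py_alt (text : String) : String :=
  let lines := ((PySem.Str.split? text "\n").getD []).filter (fun l => PySem.Str.strip l != "")
  let cum := pvCumB lines 0
  let k : Int := ((cum.filter (fun c => c ≤ 800)).length : Int)
  let kept := PySem.List.slice lines none (some k)
  let kept := if k < (lines.length : Int) then kept ++ ["..."] else kept
  PySem.Str.join "\n" kept

-- ===== PRECONDITION & SPEC =====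
def Spec_build_telegram_caption_py (text : String) (out : String) : Prop := out = build_telegram_caption_py_alt text
instance (text : String) (out : String) : Decidable (Spec_build_telegram_caption_py text out) := by unfold Spec_build_telegram_caption_py; infer_instance

-- ===== CLAIM (what is proved, stated in full; the proofs are below) =====
def Claim_equal_build_telegram_caption_py : Prop := ∀ (text : String), Dom_build_telegram_caption_py text → Spec_build_telegram_caption_py text (build_telegram_caption_py text)

-- ===== LEMMAS AND PROOFS =====

-- every entry of the prefix-sum table is at least the running total it starts from
lemma pvCumB_ge (ls : List String) (t : Int) : ∀ c ∈ pvCumB ls t, t ≤ c := by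
  induction ls generalizing t with
  | nil => intro c hc; simp [pvCumB] at hc
  | cons l rest ih =>
    intro c hc
    have hl : (0:Int) ≤ PySem.Str.len l := by simp [PySem.Str.len_eq]
    simp [pvCumB] at hc
    rcases hc with h | h
    · omega
    · have := ih (t + PySem.Str.len l) c h
      omega

-- the greedy break loop equals the count-of-prefix-sums-≤-800 cut
lemma loopA_eq (ls : List String) (t : Int) :
    pvLoopA ls t =
      ls.take ((pvCumB ls t).filter (fun c => decide (c ≤ 800))).length ++
        (if ((((pvCumB ls t).filter (fun c => decide (c ≤ 800))).length : Int) < (ls.length : Int))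
          then ["..."] else []) := by
  induction ls generalizing t with
  | nil => simp [pvLoopA, pvCumB]
  | cons l rest ih =>
    by_cases h : t + PySem.Str.len l > 800
    · have hfil : (pvCumB rest (t + PySem.Str.len l)).filter (fun c => decide (c ≤ 800)) = [] := by
        rw [List.filter_eq_nil_iff]
        intro c hc
        have h2 := pvCumB_ge rest (t + PySem.Str.len l) c hc
        simp
        simp [PySem.Str.len_eq] at h h2
        omega
      have hd : (decide ((t + PySem.Str.len l) ≤ 800)) = false := by
        simp [PySem.Str.len_eq] at h ⊢
        omega
      simp only [pvLoopA, pvCumB, List.filter_cons, hd, if_pos h, Bool.false_eq_true,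
        if_false, hfil, List.length_nil, List.take_zero, List.nil_append, Nat.cast_zero,
        List.length_cons]
      rw [if_pos (by push_cast; omega)]
    · have hd : (decide ((t + PySem.Str.len l) ≤ 800)) = true := by
        simp [PySem.Str.len_eq] at h ⊢
        omega
      simp only [pvLoopA, pvCumB, if_neg h, List.filter_cons, hd, if_true]
      rw [ih (t + PySem.Str.len l)]
      have hiff : ((((pvCumB rest (t + PySem.Str.len l)).filter (fun c => decide (c ≤ 800))).length + 1 : Nat) : Int) < ((rest.length + 1 : Nat) : Int) ↔
          ((((pvCumB rest (t + PySem.Str.len l)).filter (fun c => decide (c ≤ 800))).length : Nat) : Int) < ((rest.length : Nat) : Int) := by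
        push_cast; omega
      simp only [List.length_cons, List.take_succ_cons, List.cons_append, hiff]

-- ===== VERDICT (by name: the statement is the Claim_ definition above) =====
theorem build_telegram_caption_py_spec : Claim_equal_build_telegram_caption_py := by
  intro text _
  show build_telegram_caption_py text = build_telegram_caption_py_alt text
  simp only [build_telegram_caption_py, build_telegram_caption_py_alt]
  generalize (((PySem.Str.split? text "\n").getD []).filter (fun l => PySem.Str.strip l != "")) = lines
  rw [loopA_eq, PySem.List.slice_to _ (Int.natCast_nonneg _)]
  simp only [Int.toNat_natCast]
  split_ifs <;> simp
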